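-- pv_equiv track=rewrite | github.com/keerthana-rajbr/python-basics-practice | python_numeric_100_programs/035_check_all_digits_same_or_not.py | digits_same_or_not
-- ===== SOURCE A (Python) =====
-- def digits_same_or_not(number):
--     if number < 10:
--         return True
--     compare_digit = number % 10
--     while number > 0:
--         digit = number % 10
--         if compare_digit != digit:
--             return False
--         number //= 10
--     return True
-- ===== SOURCE B (Python) =====
-- def digits_same_or_not(number):
--     if number < 10:
--         return True
--     s = str(number)
--     first, rest = s[0], s[1:]
--     return all(ch == first for ch in rest)
-- ===== Notes on version B (the rewrite author's own statement) =====
-- stated objective: idiomatic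
-- what changed: B keeps A's initial guard for negatives and single digits but checks sameness on the decimal string representation (all characters equal the first) instead of A's arithmetic loop peeling off the last digit with modulus and integer division.
import Mathlib
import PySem

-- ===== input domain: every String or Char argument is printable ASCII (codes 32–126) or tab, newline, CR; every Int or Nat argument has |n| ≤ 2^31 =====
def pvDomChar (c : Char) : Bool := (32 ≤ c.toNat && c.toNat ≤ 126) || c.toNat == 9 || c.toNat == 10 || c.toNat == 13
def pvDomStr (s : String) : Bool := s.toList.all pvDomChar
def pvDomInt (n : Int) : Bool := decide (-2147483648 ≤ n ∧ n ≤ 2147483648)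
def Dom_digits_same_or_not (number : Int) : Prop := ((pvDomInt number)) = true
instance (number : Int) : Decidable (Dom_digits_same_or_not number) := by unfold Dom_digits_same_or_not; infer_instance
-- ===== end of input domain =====

-- B checks that all characters of str(number) equal the first (keeping A's initial guard for negatives and single digits) instead of A's digit-peeling arithmetic loop; objective: idiomatic.


-- ===== PORT A =====
-- the 'while number > 0' loop of A, with compare_digit fixed
def pvALoop (cmp number : Int) : Bool :=
  if _h : 0 < number then
    if cmp ≠ PySem.Int.mod number 10 then false
    else pvALoop cmp (PySem.Int.floordiv number 10)
  else true
termination_by number.toNat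
decreasing_by
  rw [PySem.Int.floordiv_eq_ediv_of_pos (by omega)]
  omega

def digits_same_or_not (number : Int) : Bool :=
  if number < 10 then true
  else pvALoop (PySem.Int.mod number 10) number

-- ===== PORT B =====
def digits_same_or_not_alt (number : Int) : Bool :=
  if number < 10 then true
  else
    match (PySem.Int.toStr number).toList with
    | [] => true          -- unreachable: str(number) is nonempty
    | first :: rest => rest.all (fun ch => ch == first)

-- ===== PRECONDITION & SPEC =====
def Spec_digits_same_or_not (number : Int) (out : Bool) : Prop := out = digits_same_or_not_alt number
instance (number : Int) (out : Bool) : Decidable (Spec_digits_same_or_not number out) := by unfold Spec_digits_same_or_not; infer_instance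

-- ===== CLAIM (what is proved, stated in full; the proofs are below) =====
def Claim_equal_digits_same_or_not : Prop := ∀ (number : Int), Dom_digits_same_or_not number → Spec_digits_same_or_not number (digits_same_or_not number)

-- ===== LEMMAS AND PROOFS =====

-- big-endian decimal digit characters of a natural number
def pvChA (n : Nat) : List Char :=
  if _h : n < 10 then [Nat.digitChar n]
  else pvChA (n / 10) ++ [Nat.digitChar (n % 10)]
termination_by n
decreasing_by exact Nat.div_lt_self (by omega) (by omega)

lemma pvChA_small {n : Nat} (h : n < 10) : pvChA n = [Nat.digitChar n] := by
  rw [pvChA]; simp [h]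

lemma pvChA_big {n : Nat} (h : ¬ n < 10) :
    pvChA n = pvChA (n / 10) ++ [Nat.digitChar (n % 10)] := by
  rw [pvChA]; simp [h]

lemma pvChA_ne_nil (n : Nat) : pvChA n ≠ [] := by
  by_cases h : n < 10
  · simp [pvChA_small h]
  · simp [pvChA_big h]

lemma pv_digitChar_inj {a b : Nat} (ha : a < 10) (hb : b < 10) :
    (Nat.digitChar a = Nat.digitChar b) ↔ a = b := by
  interval_cases a <;> interval_cases b <;> simp [Nat.digitChar]

lemma pv_core_step (fuel n : Nat) (ds : List Char) :
    Nat.toDigitsCore 10 (fuel + 1) n ds =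
      if n / 10 = 0 then Nat.digitChar (n % 10) :: ds
      else Nat.toDigitsCore 10 fuel (n / 10) (Nat.digitChar (n % 10) :: ds) := rfl

lemma pv_toDigitsCore_eq (fuel : Nat) : ∀ n ds, n ≤ fuel →
    Nat.toDigitsCore 10 (fuel + 1) n ds = pvChA n ++ ds := by
  induction fuel with
  | zero =>
    intro n ds hn
    have : n = 0 := by omega
    subst this
    rw [pv_core_step, pvChA_small (show (0 : Nat) < 10 by omega)]
    simp
  | succ fuel ih =>
    intro n ds hn
    by_cases h0 : n / 10 = 0
    · have hlt : n < 10 := by omega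
      rw [pv_core_step, if_pos h0, pvChA_small hlt, Nat.mod_eq_of_lt hlt]
      simp
    · have hge : ¬ n < 10 := by omega
      have hle : n / 10 ≤ fuel := by
        have := Nat.div_lt_self (by omega : 0 < n) (by omega : 1 < 10)
        omega
      rw [pv_core_step, if_neg h0, ih (n / 10) (Nat.digitChar (n % 10) :: ds) hle,
        pvChA_big hge]
      simp

lemma pv_toDigits_eq (n : Nat) : Nat.toDigits 10 n = pvChA n := by
  have := pv_toDigitsCore_eq n n [] (le_refl n)
  simpa [Nat.toDigits] using this

-- A's loop says: every decimal digit of m equals d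
lemma pvALoop_char (m : Nat) : ∀ d : Nat, 0 < m → d < 10 →
    (pvALoop (d : Int) (m : Int) = true ↔ ∀ c ∈ pvChA m, c = Nat.digitChar d) := by
  induction m using Nat.strong_induction_on with
  | _ m ih =>
    intro d hm hd
    rw [pvALoop]
    have hpos : (0 : Int) < (m : Int) := by exact_mod_cast hm
    have hmod : PySem.Int.mod (m : Int) 10 = ((m % 10 : Nat) : Int) := by
      exact_mod_cast PySem.Int.mod_natCast m 10
    have hdiv : PySem.Int.floordiv (m : Int) 10 = ((m / 10 : Nat) : Int) := by
      exact_mod_cast PySem.Int.floordiv_natCast m 10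
    simp only [dif_pos hpos, hmod, hdiv]
    by_cases h : m < 10
    · have hmm : m % 10 = m := Nat.mod_eq_of_lt h
      have hd0 : m / 10 = 0 := Nat.div_eq_of_lt h
      rw [hmm, hd0]
      by_cases hdm : d = m
      · subst hdm
        simp [pvALoop, pvChA_small h]
      · have : (d : Int) ≠ (m : Int) := by exact_mod_cast hdm
        simp only [if_pos this, pvChA_small h, List.mem_singleton, Bool.false_eq_true,
          false_iff]
        intro hcontra
        exact hdm ((pv_digitChar_inj h hd).mp (hcontra _ rfl)).symm
    · have hdivpos : 0 < m / 10 := Nat.div_pos (by omega) (by omega)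
      have hq : m / 10 < m := Nat.div_lt_self (by omega) (by omega)
      by_cases hdm : d = m % 10
      · have : ¬ ((d : Int) ≠ ((m % 10 : Nat) : Int)) := by
          simp [hdm]
        simp only [if_neg this]
        rw [ih (m / 10) hq d hdivpos hd, pvChA_big h]
        constructor
        · intro hall c hc
          rcases List.mem_append.mp hc with hc | hc
          · exact hall c hc
          · simp at hc; rw [hc, hdm]
        · intro hall c hc
          exact hall c (List.mem_append.mpr (Or.inl hc))
      · have : (d : Int) ≠ ((m % 10 : Nat) : Int) := by exact_mod_cast hdm
        simp only [if_pos this]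
        constructor
        · intro hf; exact absurd hf (by simp)
        · intro hall
          exfalso
          have hlastmem : Nat.digitChar (m % 10) ∈ pvChA m := by
            rw [pvChA_big h]; simp
          have := hall _ hlastmem
          exact hdm ((pv_digitChar_inj hd (Nat.mod_lt m (by omega))).mp this.symm)

-- all elements equal the last ↔ the tail's elements all equal the head (for length ≥ 1)
lemma pv_all_eq_last {c z : Char} {cs : List Char}
    (hlast : (c :: cs).getLast? = some z) :
    ((∀ x ∈ c :: cs, x = z) ↔ ∀ x ∈ cs, x = c) := by
  constructor
  · intro hall x hx
    have hc : c = z := hall c (by simp)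
    rw [hall x (by simp [hx]), hc]
  · intro hall
    rcases List.eq_nil_or_concat cs with rfl | ⟨ys, y, rfl⟩
    · simp only [List.getLast?_singleton, Option.some.injEq] at hlast
      intro x hx
      simp only [List.mem_singleton] at hx
      rw [hx, hlast]
    · have hy : y = z := by
        rw [show c :: ys.concat y = (c :: ys) ++ [y] by simp,
          List.getLast?_concat] at hlast
        exact Option.some.inj hlast
      have hyc : y = c := hall y (by simp)
      intro x hx
      rcases List.mem_cons.mp hx with rfl | hx
      · rw [← hyc]; exact hy
      · rw [hall x hx, ← hyc]; exact hy

-- ===== VERDICT (by name: the statement is the Claim_ definition above) =====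
theorem digits_same_or_not_spec : Claim_equal_digits_same_or_not := by
  intro number _
  unfold Spec_digits_same_or_not digits_same_or_not digits_same_or_not_alt
  by_cases hlt : number < 10
  · simp [hlt]
  · simp only [if_neg hlt]
    -- number ≥ 10
    have h10 : (10 : Int) ≤ number := by omega
    set m : Nat := number.toNat with hmdef
    have hnum : number = (m : Int) := by omega
    have hm10 : 10 ≤ m := by omega
    have hchars : (PySem.Int.toStr number).toList = pvChA m := by
      rw [PySem.Int.toList_toStr, hnum]
      simp [PySem.Int.toChars, show ¬ ((m : Int) < 0) by omega, pv_toDigits_eq]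
    rw [hchars]
    have hmod : PySem.Int.mod number 10 = ((m % 10 : Nat) : Int) := by
      rw [hnum]; exact_mod_cast PySem.Int.mod_natCast m 10
    rw [hnum] at hmod ⊢
    have hA := pvALoop_char m (m % 10) (by omega) (Nat.mod_lt m (by omega))
    rw [hmod]
    -- decompose pvChA m
    have hbig := pvChA_big (show ¬ m < 10 by omega)
    rcases hc : pvChA m with _ | ⟨first, rest⟩
    · exact absurd hc (pvChA_ne_nil m)
    · show pvALoop ((m % 10 : Nat) : Int) (m : Int) = rest.all (fun ch => ch == first)
      have hlast : (first :: rest).getLast? = some (Nat.digitChar (m % 10)) := by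
        rw [← hc, hbig]
        simp
      have key := pv_all_eq_last hlast
      rw [hc] at hA
      cases hall : rest.all (fun ch => ch == first) with
      | true =>
        exact hA.mpr (key.mpr (fun x hx => by
          simpa using List.all_eq_true.mp hall x hx))
      | false =>
        cases hAB : pvALoop ((m % 10 : Nat) : Int) (m : Int) with
        | false => rfl
        | true =>
          exfalso
          have hall' := key.mp (hA.mp hAB)
          have htrue : rest.all (fun ch => ch == first) = true :=
            List.all_eq_true.mpr (fun x hx => by simpa using hall' x hx)
          rw [hall] at htrue
          exact Bool.false_ne_true htrue
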